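-- pv_equiv track=rewrite | github.com/sumi-0011/algo | 백준/Gold/14502. 연구소/연구소.py | checkBirusNum
-- ===== SOURCE A (Python) =====
-- from collections import deque
--
-- d = [(0,1),(0,-1),(1,0), (-1,0)]
--
-- def checkBirusNum(arr):
--     N,M = len(arr), len(arr[0])
--     visited = set()
--
--     def dfs(start_node):
--         stack = deque()
--         stack.append(start_node)
--         while stack:
--             node = stack.pop()
--             visited.add(node)
--
--             for dx,dy in d:
--                 next = (node[0] + dx, node[1] + dy)
--                 if 0 <=next[0] < N and 0<= next[1] < M \
--                         and next not in visited and arr[next[0]][next[1]] == 0: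
--                     stack.append(next)
--
--     for i in range(N):
--         for j in range(M):
--             if arr[i][j] == 2:
--                 dfs((i,j))
--
--     res = 0
--     for i in range(N):
--         for j in range(M):
--             if arr[i][j] == 0 and (i,j) not in visited:
--                 res +=1
--
--     return res
-- ===== SOURCE B (Python) =====
-- d = [(0,1),(0,-1),(1,0), (-1,0)]
--
-- def checkBirusNum(arr):
--     # frontier/level-set BFS: expand whole frontier sets at once instead of a per-node stack DFS
--     N, M = len(arr), len(arr[0])
--     visited = set()
--     frontier = {(i, j) for i in range(N) for j in range(M) if arr[i][j] == 2}
--     while frontier: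
--         visited |= frontier
--         frontier = {(x + dx, y + dy) for (x, y) in frontier for dx, dy in d
--                     if 0 <= x + dx < N and 0 <= y + dy < M
--                     and (x + dx, y + dy) not in visited and arr[x + dx][y + dy] == 0}
--     return sum(1 for i in range(N) for j in range(M)
--                if arr[i][j] == 0 and (i, j) not in visited)
-- ===== Notes on version B (the rewrite author's own statement) =====
-- stated objective: alternative
-- what changed: Replaces the per-start-cell explicit-stack DFS (with a mutable visited set threaded through a nested double loop of dfs calls) by a single multi-source level-set BFS: all virus cells form the initial frontier, and each iteration absorbs the whole frontier into visited and computes the next frontier as the set of unvisited in-bounds 0-neighbours of the current frontier.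
import Mathlib
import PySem

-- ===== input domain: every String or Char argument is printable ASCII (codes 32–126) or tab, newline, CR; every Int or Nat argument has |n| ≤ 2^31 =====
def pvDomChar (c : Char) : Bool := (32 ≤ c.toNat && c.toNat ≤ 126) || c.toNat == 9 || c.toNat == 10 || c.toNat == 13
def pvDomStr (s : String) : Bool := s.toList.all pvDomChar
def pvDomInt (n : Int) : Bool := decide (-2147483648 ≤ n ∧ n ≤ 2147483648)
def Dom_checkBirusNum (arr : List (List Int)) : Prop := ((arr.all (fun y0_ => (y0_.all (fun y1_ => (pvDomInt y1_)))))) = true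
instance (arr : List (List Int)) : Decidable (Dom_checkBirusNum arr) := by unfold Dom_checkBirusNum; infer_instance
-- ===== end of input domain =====

-- B replaces A's per-start-cell explicit-stack DFS by one multi-source level-set BFS over frontier
-- sets (objective: alternative decomposition, similar cost); return value only, neither mutates input.

-- ===== PORT A =====
def pvDirs : List (Int × Int) := [(0,1),(0,-1),(1,0),(-1,0)]

def pvCell (arr : List (List Int)) (x y : Int) : Int :=
  PySem.List.pyGetD (PySem.List.pyGetD arr x []) y 0

-- in-bounds cells, used only in termination measures and proofs
def pvGrid (N M : Int) : List (Int × Int) :=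
  (PySem.List.pyRange 0 N 1).flatMap (fun i => (PySem.List.pyRange 0 M 1).map (fun j => (i, j)))

lemma pvGrid_mem (N M : Int) (c : Int × Int) :
    c ∈ pvGrid N M ↔ (0 ≤ c.1 ∧ c.1 < N ∧ 0 ≤ c.2 ∧ c.2 < M) := by
  cases c with
  | mk a b =>
    simp [pvGrid, List.mem_flatMap, PySem.List.mem_pyRange_one]
    tauto

-- generic facts about the push-if fold in A's dfs loop (cited in dfsA's termination proof)
lemma pvPush_mem {β : Type} (f : List (Int × Int) → β → List (Int × Int)) (C : β → Prop)
    [DecidablePred C] (g : β → Int × Int)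
    (hfn : ∀ st dd, f st dd = if C dd then g dd :: st else st)
    (l : List β) (acc : List (Int × Int)) (x : Int × Int)
    (hx : x ∈ l.foldl f acc) :
    x ∈ acc ∨ ∃ dd ∈ l, C dd ∧ x = g dd := by
  induction l generalizing acc with
  | nil => exact Or.inl hx
  | cons d l ih =>
    simp only [List.foldl_cons] at hx
    rcases ih _ hx with h | ⟨dd, hdd, hC, hxg⟩
    · rw [hfn] at h
      by_cases hc : C d
      · simp [hc] at h
        rcases h with h | h
        · exact Or.inr ⟨d, by simp, hc, h⟩
        · exact Or.inl h
      · simp [hc] at h; exact Or.inl h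
    · exact Or.inr ⟨dd, by simp [hdd], hC, hxg⟩

lemma pvPush_shape {β : Type} (f : List (Int × Int) → β → List (Int × Int)) (C : β → Prop)
    [DecidablePred C] (g : β → Int × Int)
    (hfn : ∀ st dd, f st dd = if C dd then g dd :: st else st)
    (l : List β) (acc : List (Int × Int)) :
    l.foldl f acc = acc ∨
      ∃ p t, l.foldl f acc = p :: t ∧ ∃ dd ∈ l, C dd ∧ p = g dd := by
  induction l generalizing acc with
  | nil => exact Or.inl rfl
  | cons d l ih =>
    simp only [List.foldl_cons]
    by_cases hc : C d
    · rcases ih (f acc d) with h | ⟨p, t, h, dd, hdd, hC, hp⟩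
      · rw [h, hfn, if_pos hc]
        exact Or.inr ⟨g d, acc, rfl, d, by simp, hc, rfl⟩
      · exact Or.inr ⟨p, t, h, dd, by simp [hdd], hC, hp⟩
    · rcases ih (f acc d) with h | ⟨p, t, h, dd, hdd, hC, hp⟩
      · rw [h, hfn, if_neg hc]
        exact Or.inl rfl
      · exact Or.inr ⟨p, t, h, dd, by simp [hdd], hC, hp⟩

-- termination measure helpers for dfsA
def pvMu1 (N M : Int) (stack : List (Int × Int)) (visited : PySem.Set (Int × Int)) : Nat :=
  ((pvGrid N M ++ stack).toFinset.filter (fun c => c ∉ visited)).card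

lemma pvMu1_le (N M : Int) (stack stack' : List (Int × Int))
    (visited visited' : PySem.Set (Int × Int))
    (hv : ∀ x, x ∈ visited → x ∈ visited')
    (hs : ∀ x ∈ stack', x ∈ pvGrid N M ∨ x ∈ stack) :
    pvMu1 N M stack' visited' ≤ pvMu1 N M stack visited := by
  apply Finset.card_le_card
  intro x hx
  simp only [Finset.mem_filter, List.mem_toFinset, List.mem_append] at hx ⊢
  rcases hx with ⟨hx1, hx2⟩
  constructor
  · rcases hx1 with h | h
    · exact Or.inl h
    · exact hs x h
  · intro hxv; exact hx2 (hv x hxv)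

lemma pvMu1_lt (N M : Int) (stack stack' : List (Int × Int))
    (visited visited' : PySem.Set (Int × Int))
    (hv : ∀ x, x ∈ visited → x ∈ visited')
    (hs : ∀ x ∈ stack', x ∈ pvGrid N M ∨ x ∈ stack)
    (w : Int × Int) (hw1 : w ∈ pvGrid N M ∨ w ∈ stack) (hw2 : w ∉ visited) (hw3 : w ∈ visited') :
    pvMu1 N M stack' visited' < pvMu1 N M stack visited := by
  apply Finset.card_lt_card
  constructor
  · intro x hx
    simp only [Finset.mem_filter, List.mem_toFinset, List.mem_append] at hx ⊢
    rcases hx with ⟨hx1, hx2⟩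
    refine ⟨?_, fun hxv => hx2 (hv x hxv)⟩
    rcases hx1 with h | h
    · exact Or.inl h
    · exact hs x h
  · intro hsub
    have := hsub (by
      simp only [Finset.mem_filter, List.mem_toFinset, List.mem_append]
      exact ⟨hw1, hw2⟩)
    simp only [Finset.mem_filter, List.mem_toFinset, List.mem_append] at this
    exact this.2 hw3

lemma pvLexHelp {a a' b b' c c' : Nat} (h1 : a' ≤ a)
    (h2 : a' = a → b' < b ∨ (b' = b ∧ c' < c)) :
    Prod.Lex (· < ·) (Prod.Lex (· < ·) (· < ·)) (a', b', c') (a, b, c) := by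
  rcases lt_or_eq_of_le h1 with h | h
  · exact Prod.Lex.left _ _ h
  · subst h
    rcases h2 rfl with hb | ⟨hb, hc⟩
    · exact Prod.Lex.right _ (Prod.Lex.left _ _ hb)
    · subst hb
      exact Prod.Lex.right _ (Prod.Lex.right _ hc)

def dfsA (arr : List (List Int)) (N M : Int) (stack : List (Int × Int))
    (visited : PySem.Set (Int × Int)) : PySem.Set (Int × Int) :=
  match stack with
  | [] => visited
  | node :: rest =>
    let visited' := PySem.Set.add visited node
    let stack' := pvDirs.foldl (fun st dd =>
        if (0 ≤ node.1 + dd.1 ∧ node.1 + dd.1 < N ∧ 0 ≤ node.2 + dd.2 ∧ node.2 + dd.2 < M ∧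
            PySem.Set.contains visited' (node.1 + dd.1, node.2 + dd.2) = false ∧
            pvCell arr (node.1 + dd.1) (node.2 + dd.2) = 0)
          then (node.1 + dd.1, node.2 + dd.2) :: st else st) rest
    dfsA arr N M stack' visited'
termination_by (pvMu1 N M stack visited,
  (match stack with | [] => 0 | node :: _ => if node ∈ visited then 1 else 0 : Nat),
  stack.length)
decreasing_by
  simp only [dite_eq_ite]
  have hmem := pvPush_mem (fun (st : List (Int × Int)) (dd : Int × Int) =>
        if (0 ≤ node.1 + dd.1 ∧ node.1 + dd.1 < N ∧ 0 ≤ node.2 + dd.2 ∧ node.2 + dd.2 < M ∧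
            PySem.Set.contains (PySem.Set.add visited node) (node.1 + dd.1, node.2 + dd.2) = false ∧
            pvCell arr (node.1 + dd.1) (node.2 + dd.2) = 0)
          then (node.1 + dd.1, node.2 + dd.2) :: st else st)
    (fun dd : Int × Int =>
        0 ≤ node.1 + dd.1 ∧ node.1 + dd.1 < N ∧ 0 ≤ node.2 + dd.2 ∧ node.2 + dd.2 < M ∧
        PySem.Set.contains (PySem.Set.add visited node) (node.1 + dd.1, node.2 + dd.2) = false ∧
        pvCell arr (node.1 + dd.1) (node.2 + dd.2) = 0)
    (fun dd : Int × Int => (node.1 + dd.1, node.2 + dd.2))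
    (fun st dd => rfl) pvDirs rest
  have hshape := pvPush_shape (fun (st : List (Int × Int)) (dd : Int × Int) =>
        if (0 ≤ node.1 + dd.1 ∧ node.1 + dd.1 < N ∧ 0 ≤ node.2 + dd.2 ∧ node.2 + dd.2 < M ∧
            PySem.Set.contains (PySem.Set.add visited node) (node.1 + dd.1, node.2 + dd.2) = false ∧
            pvCell arr (node.1 + dd.1) (node.2 + dd.2) = 0)
          then (node.1 + dd.1, node.2 + dd.2) :: st else st)
    (fun dd : Int × Int =>
        0 ≤ node.1 + dd.1 ∧ node.1 + dd.1 < N ∧ 0 ≤ node.2 + dd.2 ∧ node.2 + dd.2 < M ∧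
        PySem.Set.contains (PySem.Set.add visited node) (node.1 + dd.1, node.2 + dd.2) = false ∧
        pvCell arr (node.1 + dd.1) (node.2 + dd.2) = 0)
    (fun dd : Int × Int => (node.1 + dd.1, node.2 + dd.2))
    (fun st dd => rfl) pvDirs rest
  have hs : ∀ x ∈ List.foldl (fun (st : List (Int × Int)) (dd : Int × Int) =>
        if (0 ≤ node.1 + dd.1 ∧ node.1 + dd.1 < N ∧ 0 ≤ node.2 + dd.2 ∧ node.2 + dd.2 < M ∧
            PySem.Set.contains (PySem.Set.add visited node) (node.1 + dd.1, node.2 + dd.2) = false ∧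
            pvCell arr (node.1 + dd.1) (node.2 + dd.2) = 0)
          then (node.1 + dd.1, node.2 + dd.2) :: st else st) rest pvDirs, x ∈ pvGrid N M ∨ x ∈ node :: rest := by
    intro x hx
    rcases hmem x hx with h | ⟨dd, hdd, hC, rfl⟩
    · exact Or.inr (List.mem_cons_of_mem _ h)
    · left
      rw [pvGrid_mem]
      exact ⟨hC.1, hC.2.1, hC.2.2.1, hC.2.2.2.1⟩
  by_cases hnode : node ∈ visited
  · have hvis : ∀ x, x ∈ visited → x ∈ PySem.Set.add visited node := by
      intro x hx; rw [PySem.Set.mem_add]; exact Or.inl hx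
    have hle := pvMu1_le N M (node :: rest) (List.foldl (fun (st : List (Int × Int)) (dd : Int × Int) =>
        if (0 ≤ node.1 + dd.1 ∧ node.1 + dd.1 < N ∧ 0 ≤ node.2 + dd.2 ∧ node.2 + dd.2 < M ∧
            PySem.Set.contains (PySem.Set.add visited node) (node.1 + dd.1, node.2 + dd.2) = false ∧
            pvCell arr (node.1 + dd.1) (node.2 + dd.2) = 0)
          then (node.1 + dd.1, node.2 + dd.2) :: st else st) rest pvDirs)
      visited (PySem.Set.add visited node) hvis hs
    apply pvLexHelp hle
    intro _
    rcases hshape with hsh | ⟨p, t, hsh, dd, hdd, hC, hp⟩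
    · rw [hsh]
      cases rest with
      | nil => left; simp [hnode]
      | cons r rs =>
        by_cases hr : r ∈ visited
        · right
          constructor
          · simp [hnode, hr]
          · simp
        · left; simp [hnode, hr]
    · rw [hsh]
      left
      have hp' : p ∉ PySem.Set.add visited node := by
        intro hmemp
        rw [← PySem.Set.contains_iff] at hmemp
        rw [hp] at hmemp
        rw [hmemp] at hC
        exact absurd hC.2.2.2.2.1 (by simp)
      simp [hnode]
      exact fun hpv => hp' (by rw [PySem.Set.mem_add]; exact Or.inl hpv)
  · apply Prod.Lex.left
    apply pvMu1_lt N M (node :: rest) _ visited (PySem.Set.add visited node)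
      (fun x hx => by rw [PySem.Set.mem_add]; exact Or.inl hx) hs node
    · exact Or.inr (by simp)
    · exact hnode
    · rw [PySem.Set.mem_add]; exact Or.inr rfl

-- ===== PORT B =====
-- virus start cells, as Python's set comprehension over the double range
def pvVirus (arr : List (List Int)) (N M : Int) : PySem.Set (Int × Int) :=
  PySem.Set.ofList ((PySem.List.pyRange 0 N 1).flatMap (fun i =>
    ((PySem.List.pyRange 0 M 1).filter (fun j => pvCell arr i j == 2)).map (fun j => (i, j))))

lemma pvVirus_sub (arr : List (List Int)) (N M : Int) :
    ∀ c ∈ pvVirus arr N M, c ∈ pvGrid N M ∧ c ∉ (PySem.Set.empty : PySem.Set (Int × Int)) := by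
  intro c hc
  refine ⟨?_, by simp [PySem.Set.empty]⟩
  rw [pvVirus, PySem.Set.mem_ofList] at hc
  simp only [List.mem_flatMap, List.mem_map, List.mem_filter,
    PySem.List.mem_pyRange_one] at hc
  obtain ⟨i, hi, j, ⟨hj, _⟩, rfl⟩ := hc
  rw [pvGrid_mem]
  exact ⟨hi.1, hi.2, hj.1, hj.2⟩

lemma pvFrOk (arr : List (List Int)) (N M : Int) (fl : List (Int × Int))
    (V : PySem.Set (Int × Int)) :
    ∀ c ∈ PySem.Set.ofList
        ((fl.flatMap (fun c => pvDirs.map (fun dd => (c.1 + dd.1, c.2 + dd.2)))).filter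
          (fun nxt => decide (0 ≤ nxt.1) && decide (nxt.1 < N) && decide (0 ≤ nxt.2) &&
            decide (nxt.2 < M) && !(PySem.Set.contains V nxt) &&
            (pvCell arr nxt.1 nxt.2 == 0))),
      c ∈ pvGrid N M ∧ c ∉ V := by
  intro c hc
  rw [PySem.Set.mem_ofList, List.mem_filter] at hc
  obtain ⟨_, hcond⟩ := hc
  simp only [Bool.and_eq_true, Bool.not_eq_true', decide_eq_true_eq, beq_iff_eq] at hcond
  constructor
  · rw [pvGrid_mem]
    exact ⟨hcond.1.1.1.1.1, hcond.1.1.1.1.2, hcond.1.1.1.2, hcond.1.1.2⟩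
  · intro hmem
    have h2 := hcond.1.2
    rw [← PySem.Set.contains_iff (s := V) (x := c)] at hmem
    rw [hmem] at h2
    cases h2

def bfsB (arr : List (List Int)) (N M : Int) (frontier visited : PySem.Set (Int × Int))
    (hf : ∀ c ∈ frontier, c ∈ pvGrid N M ∧ c ∉ visited) : PySem.Set (Int × Int) :=
  if hemp : frontier = [] then visited
  else
    let visited' := PySem.Set.union visited frontier
    let frontier' := PySem.Set.ofList
      ((frontier.flatMap (fun c => pvDirs.map (fun dd => (c.1 + dd.1, c.2 + dd.2)))).filter
        (fun nxt => decide (0 ≤ nxt.1) && decide (nxt.1 < N) && decide (0 ≤ nxt.2) &&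
          decide (nxt.2 < M) && !(PySem.Set.contains visited' nxt) &&
          (pvCell arr nxt.1 nxt.2 == 0)))
    bfsB arr N M frontier' visited' (pvFrOk arr N M frontier visited')
termination_by ((pvGrid N M).toFinset.filter (fun c => c ∉ visited)).card
decreasing_by
  obtain ⟨f, hfm⟩ := List.exists_mem_of_ne_nil frontier hemp
  apply Finset.card_lt_card
  constructor
  · intro x hx
    simp only [Finset.mem_filter] at hx ⊢
    refine ⟨hx.1, fun hv => hx.2 ?_⟩
    rw [PySem.Set.mem_union]
    exact Or.inl hv
  · intro hsub
    have hff := hf f hfm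
    have := hsub (by simp only [Finset.mem_filter, List.mem_toFinset]; exact ⟨hff.1, hff.2⟩)
    simp only [Finset.mem_filter] at this
    exact this.2 (by rw [PySem.Set.mem_union]; exact Or.inr hfm)

def checkBirusNum (arr : List (List Int)) : Int :=
  let N : Int := arr.length
  let M : Int := (PySem.List.pyGetD arr 0 ([] : List Int)).length
  let visited := (PySem.List.pyRange 0 N 1).foldl (fun vis i =>
      (PySem.List.pyRange 0 M 1).foldl (fun vis j =>
        if pvCell arr i j = 2 then dfsA arr N M [(i, j)] vis else vis) vis)
    PySem.Set.empty
  (PySem.List.pyRange 0 N 1).foldl (fun res i =>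
    (PySem.List.pyRange 0 M 1).foldl (fun res j =>
      if pvCell arr i j = 0 ∧ PySem.Set.contains visited (i, j) = false then res + 1 else res) res) 0

def checkBirusNum_alt (arr : List (List Int)) : Int :=
  let N : Int := arr.length
  let M : Int := (PySem.List.pyGetD arr 0 ([] : List Int)).length
  let visited := bfsB arr N M (pvVirus arr N M) PySem.Set.empty (pvVirus_sub arr N M)
  (((PySem.List.pyRange 0 N 1).flatMap (fun i =>
      ((PySem.List.pyRange 0 M 1).filter (fun j =>
        pvCell arr i j == 0 && !(PySem.Set.contains visited (i, j)))).map
        (fun _ => (1 : Int)))).sum)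

-- ===== PRECONDITION & SPEC =====
-- Pre_ excludes exactly the inputs where Python A raises an IndexError: the empty list
-- (len(arr[0])) and grids with a row shorter than the first row (arr[i][j] in the loops).
def Pre_checkBirusNum (arr : List (List Int)) : Prop :=
  arr ≠ [] ∧ ∀ row ∈ arr, (PySem.List.pyGetD arr 0 ([] : List Int)).length ≤ row.length
instance (arr : List (List Int)) : Decidable (Pre_checkBirusNum arr) := by
  unfold Pre_checkBirusNum; infer_instance

def pvWitness_checkBirusNum : List (List Int) := [[2, 0], [1, 0]]

def Spec_checkBirusNum (arr : List (List Int)) (out : Int) : Prop := out = checkBirusNum_alt arr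
instance (arr : List (List Int)) (out : Int) : Decidable (Spec_checkBirusNum arr out) := by
  unfold Spec_checkBirusNum; infer_instance

-- ===== CLAIM (what is proved, stated in full; the proofs are below) =====
def Claim_equal_checkBirusNum : Prop := ∀ (arr : List (List Int)), Dom_checkBirusNum arr → Pre_checkBirusNum arr → Spec_checkBirusNum arr (checkBirusNum arr)

-- ===== LEMMAS AND PROOFS =====

lemma pvPush_sub {β : Type} (f : List (Int × Int) → β → List (Int × Int)) (C : β → Prop)
    [DecidablePred C] (g : β → Int × Int)
    (hfn : ∀ st dd, f st dd = if C dd then g dd :: st else st)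
    (l : List β) (acc : List (Int × Int)) (x : Int × Int) (hx : x ∈ acc) :
    x ∈ l.foldl f acc := by
  induction l generalizing acc with
  | nil => exact hx
  | cons d l ih =>
    simp only [List.foldl_cons]
    apply ih
    rw [hfn]
    by_cases h : C d <;> simp [h, hx]

lemma pvPush_in {β : Type} (f : List (Int × Int) → β → List (Int × Int)) (C : β → Prop)
    [DecidablePred C] (g : β → Int × Int)
    (hfn : ∀ st dd, f st dd = if C dd then g dd :: st else st)
    (l : List β) (acc : List (Int × Int)) (dd : β) (hdd : dd ∈ l) (hC : C dd) :
    g dd ∈ l.foldl f acc := by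
  induction l generalizing acc with
  | nil => cases hdd
  | cons d l ih =>
    simp only [List.foldl_cons]
    rcases List.mem_cons.mp hdd with h | h
    · subst h
      exact pvPush_sub f C g hfn l _ _ (by rw [hfn, if_pos hC]; simp)
    · exact ih _ h


-- generic fold helpers
lemma pvFoldPres {α β : Type} (f : α → β → α) (P : α → Prop) (l : List β)
    (h : ∀ acc b, b ∈ l → P acc → P (f acc b)) : ∀ acc, P acc → P (l.foldl f acc) := by
  induction l with
  | nil => intro acc h2; exact h2
  | cons b l ih =>
    intro acc h2
    exact ih (fun acc' b' hb' => h acc' b' (List.mem_cons_of_mem _ hb')) _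
      (h acc b (by simp) h2)

lemma pvFoldEstab {α β : Type} (f : α → β → α) (P : α → Prop) (l : List β) (b : β)
    (hb : b ∈ l) (hpres : ∀ acc b', b' ∈ l → P acc → P (f acc b'))
    (hset : ∀ acc, P (f acc b)) : ∀ acc, P (l.foldl f acc) := by
  induction l with
  | nil => cases hb
  | cons c l ih =>
    intro acc
    rcases List.mem_cons.mp hb with h | h
    · subst h
      exact pvFoldPres f P l (fun a b' hb' => hpres a b' (List.mem_cons_of_mem _ hb')) _
        (hset acc)
    · exact ih h (fun a b' hb' => hpres a b' (List.mem_cons_of_mem _ hb')) _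

lemma pvFoldExt {α β : Type} (f g : α → β → α) (l : List β)
    (h : ∀ acc b, b ∈ l → f acc b = g acc b) : ∀ acc, l.foldl f acc = l.foldl g acc := by
  induction l with
  | nil => intro acc; rfl
  | cons b l ih =>
    intro acc
    simp only [List.foldl_cons]
    rw [h acc b (by simp)]
    exact ih (fun a b' hb' => h a b' (List.mem_cons_of_mem _ hb')) _

lemma pvFoldCount {β : Type} (p : β → Prop) [DecidablePred p] (l : List β) :
    ∀ r : Int, l.foldl (fun res b => if p b then res + 1 else res) r
      = r + ((l.filter (fun b => decide (p b))).length : Int) := by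
  induction l with
  | nil => intro r; simp
  | cons b l ih =>
    intro r
    simp only [List.foldl_cons]
    by_cases hp : p b
    · rw [ih]
      simp [hp]
      ring
    · rw [ih]
      simp [hp]

lemma pvFoldSum {β : Type} (f : β → Int) (l : List β) :
    ∀ r : Int, l.foldl (fun res b => res + f b) r = r + (l.map f).sum := by
  induction l with
  | nil => intro r; simp
  | cons b l ih =>
    intro r
    simp only [List.foldl_cons, List.map_cons, List.sum_cons]
    rw [ih]
    ring

lemma pvSumFlat {β : Type} (g : β → List Int) (l : List β) :
    (l.flatMap g).sum = (l.map (fun b => (g b).sum)).sum := by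
  induction l with
  | nil => simp
  | cons b l ih => simp [List.flatMap_cons, ih]

lemma pvSumOnes {β : Type} (l : List β) :
    (l.map (fun _ => (1 : Int))).sum = (l.length : Int) := by
  induction l with
  | nil => simp
  | cons b l ih => simp [ih]; ring

-- the push condition of A's dfs loop (abbrev so instances and defeq see through it)
abbrev pvC (arr : List (List Int)) (N M : Int) (V : PySem.Set (Int × Int))
    (node dd : Int × Int) : Prop :=
  0 ≤ node.1 + dd.1 ∧ node.1 + dd.1 < N ∧ 0 ≤ node.2 + dd.2 ∧ node.2 + dd.2 < M ∧
    PySem.Set.contains V (node.1 + dd.1, node.2 + dd.2) = false ∧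
    pvCell arr (node.1 + dd.1) (node.2 + dd.2) = 0

lemma pvSt_sub (arr : List (List Int)) (N M : Int) (V : PySem.Set (Int × Int))
    (node : Int × Int) (rest : List (Int × Int)) (x : Int × Int) (hx : x ∈ rest) :
    x ∈ pvDirs.foldl (fun st dd => if pvC arr N M V node dd
      then (node.1 + dd.1, node.2 + dd.2) :: st else st) rest :=
  pvPush_sub _ (pvC arr N M V node) (fun dd => (node.1 + dd.1, node.2 + dd.2))
    (fun _ _ => rfl) pvDirs rest x hx

lemma pvSt_mem (arr : List (List Int)) (N M : Int) (V : PySem.Set (Int × Int))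
    (node : Int × Int) (rest : List (Int × Int)) (x : Int × Int)
    (hx : x ∈ pvDirs.foldl (fun st dd => if pvC arr N M V node dd
      then (node.1 + dd.1, node.2 + dd.2) :: st else st) rest) :
    x ∈ rest ∨ ∃ dd ∈ pvDirs, pvC arr N M V node dd ∧ x = (node.1 + dd.1, node.2 + dd.2) :=
  pvPush_mem _ (pvC arr N M V node) (fun dd => (node.1 + dd.1, node.2 + dd.2))
    (fun _ _ => rfl) pvDirs rest x hx

lemma pvSt_in (arr : List (List Int)) (N M : Int) (V : PySem.Set (Int × Int))
    (node : Int × Int) (rest : List (Int × Int)) (dd : Int × Int)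
    (hdd : dd ∈ pvDirs) (hC : pvC arr N M V node dd) :
    (node.1 + dd.1, node.2 + dd.2) ∈ pvDirs.foldl (fun st dd => if pvC arr N M V node dd
      then (node.1 + dd.1, node.2 + dd.2) :: st else st) rest :=
  pvPush_in _ (pvC arr N M V node) (fun dd => (node.1 + dd.1, node.2 + dd.2))
    (fun _ _ => rfl) pvDirs rest dd hdd hC

-- cells reachable from a virus cell through in-bounds 0-cells (the common spec)
inductive pvReach (arr : List (List Int)) (N M : Int) : (Int × Int) → Prop where
  | base : ∀ c, c ∈ pvGrid N M → pvCell arr c.1 c.2 = 2 → pvReach arr N M c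
  | step : ∀ u dd, pvReach arr N M u → dd ∈ pvDirs →
      (u.1 + dd.1, u.2 + dd.2) ∈ pvGrid N M → pvCell arr (u.1 + dd.1) (u.2 + dd.2) = 0 →
      pvReach arr N M (u.1 + dd.1, u.2 + dd.2)

-- ===== A-side: the stack dfs computes exactly the reachable set =====
lemma dfsA_unfold (arr : List (List Int)) (N M : Int) (visited : PySem.Set (Int × Int))
    (node : Int × Int) (rest : List (Int × Int)) :
    dfsA arr N M (node :: rest) visited
      = dfsA arr N M
          (pvDirs.foldl (fun st dd => if pvC arr N M (PySem.Set.add visited node) node dd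
            then (node.1 + dd.1, node.2 + dd.2) :: st else st) rest)
          (PySem.Set.add visited node) := by
  conv_lhs => rw [dfsA.eq_def]

lemma dfsA_mono (arr : List (List Int)) (N M : Int) :
    ∀ stack visited, ∀ x ∈ visited, x ∈ dfsA arr N M stack visited := by
  intro stack visited
  induction stack, visited using dfsA.induct arr N M with
  | case1 visited => intro x hx; simpa [dfsA] using hx
  | case2 visited node rest visited' stack' ih =>
    intro x hx
    rw [dfsA_unfold]
    exact ih x (by rw [PySem.Set.mem_add]; exact Or.inl hx)

lemma dfsA_stack (arr : List (List Int)) (N M : Int) :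
    ∀ stack visited, ∀ x ∈ stack, x ∈ dfsA arr N M stack visited := by
  intro stack visited
  induction stack, visited using dfsA.induct arr N M with
  | case1 visited => intro x hx; cases hx
  | case2 visited node rest visited' stack' ih =>
    intro x hx
    rw [dfsA_unfold]
    rcases List.mem_cons.mp hx with h | h
    · subst h
      exact dfsA_mono arr N M _ _ x (by rw [PySem.Set.mem_add]; exact Or.inr rfl)
    · exact ih x (pvSt_sub arr N M _ node rest x h)

lemma dfsA_sound (arr : List (List Int)) (N M : Int) :
    ∀ stack visited, (∀ c ∈ stack, pvReach arr N M c) →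
      ∀ x ∈ dfsA arr N M stack visited, x ∈ visited ∨ pvReach arr N M x := by
  intro stack visited
  induction stack, visited using dfsA.induct arr N M with
  | case1 visited => intro _ x hx; simp [dfsA] at hx; exact Or.inl hx
  | case2 visited node rest visited' stack' ih =>
    intro hst x hx
    rw [dfsA_unfold] at hx
    have hst' : ∀ c ∈ pvDirs.foldl (fun st dd =>
        if pvC arr N M (PySem.Set.add visited node) node dd
          then (node.1 + dd.1, node.2 + dd.2) :: st else st) rest, pvReach arr N M c := by
      intro c hc
      rcases pvSt_mem arr N M _ node rest c hc with h | ⟨dd, hdd, hC, rfl⟩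
      · exact hst c (List.mem_cons_of_mem _ h)
      · exact pvReach.step node dd (hst node (by simp)) hdd
          (by rw [pvGrid_mem]; exact ⟨hC.1, hC.2.1, hC.2.2.1, hC.2.2.2.1⟩) hC.2.2.2.2.2
    rcases ih hst' x hx with h | h
    · rw [PySem.Set.mem_add] at h
      rcases h with h | h
      · exact Or.inl h
      · subst h; exact Or.inr (hst x (by simp))
    · exact Or.inr h

lemma dfsA_closed (arr : List (List Int)) (N M : Int) :
    ∀ stack visited, ∀ x ∈ dfsA arr N M stack visited,
      x ∈ visited ∨ ∀ dd ∈ pvDirs, (x.1 + dd.1, x.2 + dd.2) ∈ pvGrid N M →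
        pvCell arr (x.1 + dd.1) (x.2 + dd.2) = 0 →
        (x.1 + dd.1, x.2 + dd.2) ∈ dfsA arr N M stack visited := by
  intro stack visited
  induction stack, visited using dfsA.induct arr N M with
  | case1 visited => intro x hx; simp [dfsA] at hx ⊢; exact Or.inl hx
  | case2 visited node rest visited' stack' ih =>
    intro x hx
    rw [dfsA_unfold] at hx
    rw [dfsA_unfold]
    rcases ih x hx with h | h
    · rw [PySem.Set.mem_add] at h
      rcases h with h | h
      · exact Or.inl h
      · subst h
        right
        intro dd hdd hg hc0
        by_cases hct : PySem.Set.contains (PySem.Set.add visited x) (x.1 + dd.1, x.2 + dd.2)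
          = true
        · exact dfsA_mono arr N M _ _ _ ((PySem.Set.contains_iff (s := _) (x := _)).mp hct)
        · rw [pvGrid_mem] at hg
          have hcf : PySem.Set.contains (PySem.Set.add visited x)
              (x.1 + dd.1, x.2 + dd.2) = false := by
            cases hb : PySem.Set.contains (PySem.Set.add visited x) (x.1 + dd.1, x.2 + dd.2)
            · rfl
            · exact absurd hb hct
          have hC : pvC arr N M (PySem.Set.add visited x) x dd :=
            ⟨hg.1, hg.2.1, hg.2.2.1, hg.2.2.2, hcf, hc0⟩
          exact dfsA_stack arr N M _ _ _ (pvSt_in arr N M _ x rest dd hdd hC)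
    · exact Or.inr h

-- the visited set after A's double virus loop, and after B's bfs
def pvN (arr : List (List Int)) : Int := (arr.length : Int)
def pvM (arr : List (List Int)) : Int := ((PySem.List.pyGetD arr 0 ([] : List Int)).length : Int)

def pvVisA (arr : List (List Int)) : PySem.Set (Int × Int) :=
  (PySem.List.pyRange 0 (pvN arr) 1).foldl (fun vis i =>
      (PySem.List.pyRange 0 (pvM arr) 1).foldl (fun vis j =>
        if pvCell arr i j = 2 then dfsA arr (pvN arr) (pvM arr) [(i, j)] vis else vis) vis)
    PySem.Set.empty

def pvVisB (arr : List (List Int)) : PySem.Set (Int × Int) :=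
  bfsB arr (pvN arr) (pvM arr) (pvVirus arr (pvN arr) (pvM arr)) PySem.Set.empty
    (pvVirus_sub arr (pvN arr) (pvM arr))

lemma pvVirus_mem (arr : List (List Int)) (N M : Int) (c : Int × Int) :
    c ∈ pvVirus arr N M ↔ c ∈ pvGrid N M ∧ pvCell arr c.1 c.2 = 2 := by
  obtain ⟨a, b⟩ := c
  rw [pvVirus, PySem.Set.mem_ofList, pvGrid_mem]
  simp only [List.mem_flatMap, List.mem_map, List.mem_filter, PySem.List.mem_pyRange_one,
    beq_iff_eq]
  constructor
  · rintro ⟨i, hi, j, ⟨hj, hc⟩, h⟩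
    injection h with h1 h2
    subst h1
    subst h2
    exact ⟨⟨hi.1, hi.2, hj.1, hj.2⟩, hc⟩
  · rintro ⟨⟨h1, h2, h3, h4⟩, hc⟩
    exact ⟨a, ⟨h1, h2⟩, b, ⟨⟨h3, h4⟩, hc⟩, rfl⟩

lemma pvVisA_mem_step (arr : List (List Int)) (vis : PySem.Set (Int × Int)) (i j : Int)
    (x : Int × Int) (hx : x ∈ vis) :
    x ∈ (if pvCell arr i j = 2 then dfsA arr (pvN arr) (pvM arr) [(i, j)] vis else vis) := by
  by_cases h : pvCell arr i j = 2
  · rw [if_pos h]; exact dfsA_mono arr (pvN arr) (pvM arr) _ _ x hx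
  · rwa [if_neg h]

lemma pvVisA_inner_mono (arr : List (List Int)) (i : Int) (vis : PySem.Set (Int × Int))
    (x : Int × Int) (hx : x ∈ vis) :
    x ∈ (PySem.List.pyRange 0 (pvM arr) 1).foldl (fun vis j =>
      if pvCell arr i j = 2 then dfsA arr (pvN arr) (pvM arr) [(i, j)] vis else vis) vis :=
  pvFoldPres _ (fun v => x ∈ v) _ (fun acc b _ h => pvVisA_mem_step arr acc i b x h) vis hx

lemma pvVisA_virus (arr : List (List Int)) (c : Int × Int)
    (hg : c ∈ pvGrid (pvN arr) (pvM arr)) (hc : pvCell arr c.1 c.2 = 2) :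
    c ∈ pvVisA arr := by
  obtain ⟨i, j⟩ := c
  rw [pvGrid_mem] at hg
  apply pvFoldEstab _ (fun v => (i, j) ∈ v) _ i
    (by rw [PySem.List.mem_pyRange_one]; exact ⟨hg.1, hg.2.1⟩)
    (fun acc b _ h => pvVisA_inner_mono arr b acc _ h)
  intro acc
  apply pvFoldEstab _ (fun v => (i, j) ∈ v) _ j
    (by rw [PySem.List.mem_pyRange_one]; exact ⟨hg.2.2.1, hg.2.2.2⟩)
    (fun acc' b _ h => pvVisA_mem_step arr acc' i b _ h)
  intro acc'
  rw [if_pos hc]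
  exact dfsA_stack arr (pvN arr) (pvM arr) _ _ _ (by simp)

lemma pvVisA_sound (arr : List (List Int)) :
    ∀ x ∈ pvVisA arr, pvReach arr (pvN arr) (pvM arr) x := by
  have key : ∀ y ∈ pvVisA arr, y ∈ (PySem.Set.empty : PySem.Set (Int × Int)) ∨
      pvReach arr (pvN arr) (pvM arr) y := by
    refine pvFoldPres _ (fun v => ∀ y ∈ v, y ∈ (PySem.Set.empty : PySem.Set (Int × Int)) ∨
      pvReach arr (pvN arr) (pvM arr) y) _ ?_ PySem.Set.empty (fun y hy => Or.inl hy)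
    intro acc i hi hacc
    refine pvFoldPres _ (fun v => ∀ y ∈ v, y ∈ (PySem.Set.empty : PySem.Set (Int × Int)) ∨
      pvReach arr (pvN arr) (pvM arr) y) _ ?_ acc hacc
    intro acc' j hj hacc' y hy
    by_cases h2 : pvCell arr i j = 2
    · rw [if_pos h2] at hy
      have hstart : ∀ c ∈ [((i : Int), (j : Int))], pvReach arr (pvN arr) (pvM arr) c := by
        intro c hc
        simp only [List.mem_singleton] at hc
        subst hc
        refine pvReach.base (i, j) ?_ h2
        rw [PySem.List.mem_pyRange_one] at hi hj
        rw [pvGrid_mem]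
        exact ⟨hi.1, hi.2, hj.1, hj.2⟩
      rcases dfsA_sound arr (pvN arr) (pvM arr) _ acc' hstart y hy with h | h
      · exact hacc' y h
      · exact Or.inr h
    · rw [if_neg h2] at hy
      exact hacc' y hy
  intro x hx
  rcases key x hx with h | h
  · cases h
  · exact h

lemma pvVisA_closed (arr : List (List Int)) :
    ∀ x ∈ pvVisA arr, ∀ dd ∈ pvDirs, (x.1 + dd.1, x.2 + dd.2) ∈ pvGrid (pvN arr) (pvM arr) →
      pvCell arr (x.1 + dd.1) (x.2 + dd.2) = 0 → (x.1 + dd.1, x.2 + dd.2) ∈ pvVisA arr := by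
  refine pvFoldPres _ (fun v => ∀ x ∈ v, ∀ dd ∈ pvDirs,
      (x.1 + dd.1, x.2 + dd.2) ∈ pvGrid (pvN arr) (pvM arr) →
      pvCell arr (x.1 + dd.1) (x.2 + dd.2) = 0 → (x.1 + dd.1, x.2 + dd.2) ∈ v) _ ?_
    PySem.Set.empty (fun x hx => absurd hx (by simp [PySem.Set.empty]))
  intro acc i _ hacc
  refine pvFoldPres _ (fun v => ∀ x ∈ v, ∀ dd ∈ pvDirs,
      (x.1 + dd.1, x.2 + dd.2) ∈ pvGrid (pvN arr) (pvM arr) →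
      pvCell arr (x.1 + dd.1) (x.2 + dd.2) = 0 → (x.1 + dd.1, x.2 + dd.2) ∈ v) _ ?_ acc hacc
  intro acc' j _ hacc' x hx dd hdd hg hc0
  by_cases h2 : pvCell arr i j = 2
  · rw [if_pos h2] at hx ⊢
    rcases dfsA_closed arr (pvN arr) (pvM arr) _ acc' x hx with h | h
    · exact dfsA_mono arr (pvN arr) (pvM arr) _ _ _ (hacc' x h dd hdd hg hc0)
    · exact h dd hdd hg hc0
  · rw [if_neg h2] at hx ⊢
    exact hacc' x hx dd hdd hg hc0

lemma pvVisA_iff (arr : List (List Int)) (c : Int × Int) :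
    c ∈ pvVisA arr ↔ pvReach arr (pvN arr) (pvM arr) c := by
  constructor
  · exact pvVisA_sound arr c
  · intro h
    induction h with
    | base c hg hc => exact pvVisA_virus arr c hg hc
    | step u dd hu hdd hg hc ih => exact pvVisA_closed arr u ih dd hdd hg hc

-- ===== B-side: the frontier bfs computes the same reachable set =====
lemma pvFr_mem (arr : List (List Int)) (N M : Int) (fl : List (Int × Int))
    (V : PySem.Set (Int × Int)) (x : Int × Int) :
    x ∈ PySem.Set.ofList
        ((fl.flatMap (fun c => pvDirs.map (fun dd => (c.1 + dd.1, c.2 + dd.2)))).filter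
          (fun nxt => decide (0 ≤ nxt.1) && decide (nxt.1 < N) && decide (0 ≤ nxt.2) &&
            decide (nxt.2 < M) && !(PySem.Set.contains V nxt) &&
            (pvCell arr nxt.1 nxt.2 == 0)))
      ↔ ((∃ c ∈ fl, ∃ dd ∈ pvDirs, x = (c.1 + dd.1, c.2 + dd.2)) ∧
          x ∈ pvGrid N M ∧ PySem.Set.contains V x = false ∧ pvCell arr x.1 x.2 = 0) := by
  rw [PySem.Set.mem_ofList, List.mem_filter, pvGrid_mem]
  simp only [List.mem_flatMap, List.mem_map, Bool.and_eq_true, Bool.not_eq_true',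
    decide_eq_true_eq, beq_iff_eq]
  constructor
  · rintro ⟨⟨c, hc, dd, hdd, rfl⟩, hcond⟩
    exact ⟨⟨c, hc, dd, hdd, rfl⟩,
      ⟨hcond.1.1.1.1.1, hcond.1.1.1.1.2, hcond.1.1.1.2, hcond.1.1.2⟩, hcond.1.2, hcond.2⟩
  · rintro ⟨⟨c, hc, dd, hdd, rfl⟩, hb, hv, h0⟩
    exact ⟨⟨c, hc, dd, hdd, rfl⟩, ⟨⟨⟨⟨⟨hb.1, hb.2.1⟩, hb.2.2.1⟩, hb.2.2.2⟩, hv⟩, h0⟩⟩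

lemma bfsB_empty (arr : List (List Int)) (N M : Int) (visited : PySem.Set (Int × Int))
    (hf : ∀ c ∈ ([] : List (Int × Int)), c ∈ pvGrid N M ∧ c ∉ visited) :
    bfsB arr N M [] visited hf = visited := by
  conv_lhs => rw [bfsB.eq_def]
  rw [dif_pos rfl]

lemma bfsB_unfold (arr : List (List Int)) (N M : Int)
    (frontier visited : PySem.Set (Int × Int))
    (hf : ∀ c ∈ frontier, c ∈ pvGrid N M ∧ c ∉ visited) (h : frontier ≠ []) :
    bfsB arr N M frontier visited hf
      = bfsB arr N M
          (PySem.Set.ofList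
            ((frontier.flatMap (fun c => pvDirs.map (fun dd => (c.1 + dd.1, c.2 + dd.2)))).filter
              (fun nxt => decide (0 ≤ nxt.1) && decide (nxt.1 < N) && decide (0 ≤ nxt.2) &&
                decide (nxt.2 < M) &&
                !(PySem.Set.contains (PySem.Set.union visited frontier) nxt) &&
                (pvCell arr nxt.1 nxt.2 == 0))))
          (PySem.Set.union visited frontier)
          (pvFrOk arr N M frontier (PySem.Set.union visited frontier)) := by
  conv_lhs => rw [bfsB.eq_def]
  rw [dif_neg h]

lemma bfsB_mono (arr : List (List Int)) (N M : Int) :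
    ∀ frontier visited hf, ∀ x ∈ visited, x ∈ bfsB arr N M frontier visited hf := by
  intro frontier visited hf
  induction frontier, visited, hf using bfsB.induct arr N M with
  | case1 visited hf =>
    intro x hx
    rwa [bfsB_empty]
  | case2 frontier visited hf hemp visited' frontier' ih =>
    intro x hx
    rw [bfsB_unfold arr N M frontier visited hf hemp]
    exact ih x (by rw [PySem.Set.mem_union]; exact Or.inl hx)

lemma bfsB_frontier (arr : List (List Int)) (N M : Int) :
    ∀ frontier visited hf, ∀ x ∈ frontier, x ∈ bfsB arr N M frontier visited hf := by
  intro frontier visited hf x hx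
  have hne : frontier ≠ [] := by rintro rfl; cases hx
  rw [bfsB_unfold arr N M frontier visited hf hne]
  exact bfsB_mono arr N M _ _ _ x (by rw [PySem.Set.mem_union]; exact Or.inr hx)

lemma bfsB_sound (arr : List (List Int)) (N M : Int) :
    ∀ frontier visited hf, (∀ c ∈ frontier, pvReach arr N M c) →
      ∀ x ∈ bfsB arr N M frontier visited hf, x ∈ visited ∨ pvReach arr N M x := by
  intro frontier visited hf
  induction frontier, visited, hf using bfsB.induct arr N M with
  | case1 visited hf =>
    intro _ x hx
    rw [bfsB_empty] at hx
    exact Or.inl hx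
  | case2 frontier visited hf hemp visited' frontier' ih =>
    intro hr x hx
    rw [bfsB_unfold arr N M frontier visited hf hemp] at hx
    have hr' : ∀ c ∈ PySem.Set.ofList
        ((frontier.flatMap (fun c => pvDirs.map (fun dd => (c.1 + dd.1, c.2 + dd.2)))).filter
          (fun nxt => decide (0 ≤ nxt.1) && decide (nxt.1 < N) && decide (0 ≤ nxt.2) &&
            decide (nxt.2 < M) &&
            !(PySem.Set.contains (PySem.Set.union visited frontier) nxt) &&
            (pvCell arr nxt.1 nxt.2 == 0))), pvReach arr N M c := by
      intro c hc
      rcases (pvFr_mem arr N M frontier (PySem.Set.union visited frontier) c).mp hc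
        with ⟨⟨u, hu, dd, hdd, rfl⟩, hb, _, h0⟩
      exact pvReach.step u dd (hr u hu) hdd hb h0
    rcases ih hr' x hx with h | h
    · rw [PySem.Set.mem_union] at h
      rcases h with h | h
      · exact Or.inl h
      · exact Or.inr (hr x h)
    · exact Or.inr h

lemma bfsB_closed (arr : List (List Int)) (N M : Int) :
    ∀ frontier visited hf, ∀ x ∈ bfsB arr N M frontier visited hf,
      x ∈ visited ∨ ∀ dd ∈ pvDirs, (x.1 + dd.1, x.2 + dd.2) ∈ pvGrid N M →
        pvCell arr (x.1 + dd.1) (x.2 + dd.2) = 0 →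
        (x.1 + dd.1, x.2 + dd.2) ∈ bfsB arr N M frontier visited hf := by
  intro frontier visited hf
  induction frontier, visited, hf using bfsB.induct arr N M with
  | case1 visited hf =>
    intro x hx
    rw [bfsB_empty] at hx ⊢
    exact Or.inl hx
  | case2 frontier visited hf hemp visited' frontier' ih =>
    intro x hx
    rw [bfsB_unfold arr N M frontier visited hf hemp] at hx ⊢
    rcases ih x hx with h | h
    · rw [PySem.Set.mem_union] at h
      rcases h with h | h
      · exact Or.inl h
      · right
        intro dd hdd hg hc0
        by_cases hct : PySem.Set.contains (PySem.Set.union visited frontier)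
            (x.1 + dd.1, x.2 + dd.2) = true
        · exact bfsB_mono arr N M _ _ _ _
            ((PySem.Set.contains_iff (s := _) (x := _)).mp hct)
        · apply bfsB_frontier arr N M _ _ _
          apply (pvFr_mem arr N M frontier (PySem.Set.union visited frontier) _).mpr
          refine ⟨⟨x, h, dd, hdd, rfl⟩, hg, ?_, hc0⟩
          cases hb : PySem.Set.contains (PySem.Set.union visited frontier)
              (x.1 + dd.1, x.2 + dd.2)
          · rfl
          · exact absurd hb hct
    · exact Or.inr h

lemma pvVisB_iff (arr : List (List Int)) (c : Int × Int) :
    c ∈ pvVisB arr ↔ pvReach arr (pvN arr) (pvM arr) c := by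
  constructor
  · intro h
    have hr : ∀ u ∈ pvVirus arr (pvN arr) (pvM arr), pvReach arr (pvN arr) (pvM arr) u := by
      intro u hu
      rcases (pvVirus_mem arr (pvN arr) (pvM arr) u).mp hu with ⟨hg, h2⟩
      exact pvReach.base u hg h2
    rcases bfsB_sound arr (pvN arr) (pvM arr) _ _ _ hr c h with h' | h'
    · cases h'
    · exact h'
  · intro h
    induction h with
    | base u hg h2 =>
      exact bfsB_frontier arr (pvN arr) (pvM arr) _ _ _ u
        ((pvVirus_mem arr (pvN arr) (pvM arr) u).mpr ⟨hg, h2⟩)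
    | step u dd hu hdd hg hc ih =>
      rcases bfsB_closed arr (pvN arr) (pvM arr) _ _ _ u ih with h' | h'
      · cases h'
      · exact h' dd hdd hg hc

-- ===== the two counts agree =====
lemma pvContains_eq (arr : List (List Int)) (c : Int × Int) :
    PySem.Set.contains (pvVisA arr) c = PySem.Set.contains (pvVisB arr) c := by
  rw [Bool.eq_iff_iff, PySem.Set.contains_iff, PySem.Set.contains_iff,
    pvVisA_iff, pvVisB_iff]

lemma pvMain (arr : List (List Int)) : checkBirusNum arr = checkBirusNum_alt arr := by
  have hA : checkBirusNum arr
      = (PySem.List.pyRange 0 (pvN arr) 1).foldl (fun res i =>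
          (PySem.List.pyRange 0 (pvM arr) 1).foldl (fun res j =>
            if pvCell arr i j = 0 ∧ PySem.Set.contains (pvVisA arr) (i, j) = false
              then res + 1 else res) res) 0 := rfl
  have hB : checkBirusNum_alt arr
      = (((PySem.List.pyRange 0 (pvN arr) 1).flatMap (fun i =>
          ((PySem.List.pyRange 0 (pvM arr) 1).filter (fun j =>
            pvCell arr i j == 0 && !(PySem.Set.contains (pvVisB arr) (i, j)))).map
            (fun _ => (1 : Int)))).sum) := rfl
  rw [hA, hB]
  rw [pvSumFlat]
  have hBsum : ∀ i : Int,
      ((((PySem.List.pyRange 0 (pvM arr) 1).filter (fun j =>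
        pvCell arr i j == 0 && !(PySem.Set.contains (pvVisB arr) (i, j)))).map
        (fun _ => (1 : Int))).sum)
      = ((((PySem.List.pyRange 0 (pvM arr) 1).filter (fun j =>
          decide (pvCell arr i j = 0 ∧
            PySem.Set.contains (pvVisA arr) (i, j) = false))).length : Nat) : Int) := by
    intro i
    rw [pvSumOnes]
    congr 2
    apply List.filter_congr
    intro j _
    rw [pvContains_eq arr (i, j)]
    cases hb : PySem.Set.contains (pvVisB arr) (i, j) <;>
      by_cases h0 : pvCell arr i j = 0 <;> simp [h0, hb]
  rw [pvFoldExt _ (fun res i => res +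
      ((((PySem.List.pyRange 0 (pvM arr) 1).filter (fun j =>
        decide (pvCell arr i j = 0 ∧
          PySem.Set.contains (pvVisA arr) (i, j) = false))).length : Nat) : Int)) _
    (fun acc i _ => pvFoldCount
      (fun j => pvCell arr i j = 0 ∧ PySem.Set.contains (pvVisA arr) (i, j) = false) _ acc) 0]
  rw [pvFoldSum]
  rw [zero_add]
  congr 1
  apply List.map_congr_left
  intro i _
  exact (hBsum i).symm

-- ===== VERDICT (by name: the statement is the Claim_ definition above) =====
theorem checkBirusNum_spec : Claim_equal_checkBirusNum := by
  intro arr _ _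
  unfold Spec_checkBirusNum
  exact pvMain arr
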